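-- pv_equiv track=rewrite | github.com/z1chh/Challenges | src/Codility/Lessons/3-3_splitArrayDifference.py | n2
-- ===== SOURCE A (Python) =====
-- def n2(A):
--     best = 2000000000
--     for P in range(1, len(A)):
--         cur = 0
--         for el in A[:P]:
--             cur += el
--         for el in A[P:]:
--             cur -= el
--         if abs(cur) < best:
--             best = abs(cur)
--     return best
-- ===== SOURCE B (Python) =====
-- def n2(A):
--     best = 2000000000
--     total = sum(A)
--     left = 0
--     for el in A[:-1]:
--         left += el
--         d = abs(2 * left - total)
--         if d < best:
--             best = d
--     return best
-- ===== Notes on version B (the rewrite author's own statement) =====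
-- stated objective: faster
-- what changed: Replaces the quadratic re-summation of both slices for every split point with a single pass keeping a running prefix sum and comparing 2*prefix - total.
import Mathlib
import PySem

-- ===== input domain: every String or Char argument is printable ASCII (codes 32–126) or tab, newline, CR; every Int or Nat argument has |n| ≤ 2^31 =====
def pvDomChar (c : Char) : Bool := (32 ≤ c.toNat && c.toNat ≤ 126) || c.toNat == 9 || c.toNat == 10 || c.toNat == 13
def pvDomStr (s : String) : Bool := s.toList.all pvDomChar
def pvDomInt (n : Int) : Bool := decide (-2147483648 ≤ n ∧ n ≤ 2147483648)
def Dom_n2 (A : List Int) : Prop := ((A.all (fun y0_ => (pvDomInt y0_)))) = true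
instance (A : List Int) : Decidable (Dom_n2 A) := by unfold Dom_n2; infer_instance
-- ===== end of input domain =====

-- B replaces A's quadratic re-summation of both slices at every split with one pass over a running prefix sum (asymptotic speed-up; return value only, no mutation).

-- ===== PORT A =====
def n2 (A : List Int) : Int :=
  (PySem.List.pyRange 1 (A.length : Int) 1).foldl (fun best P =>
    let cur : Int := (PySem.List.slice A none (some P)).foldl (fun c el => c + el) 0
    let cur : Int := (PySem.List.slice A (some P) none).foldl (fun c el => c - el) cur
    if |cur| < best then |cur| else best) 2000000000

-- ===== PORT B =====
def n2_alt (A : List Int) : Int :=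
  let total : Int := A.foldl (fun s el => s + el) 0
  let st := (PySem.List.slice A none (some (-1))).foldl (fun (p : Int × Int) el =>
    let left := p.1 + el
    let d := |2 * left - total|
    (left, if d < p.2 then d else p.2)) (0, 2000000000)
  st.2

-- ===== PRECONDITION & SPEC =====
def Spec_n2 (A : List Int) (out : Int) : Prop := out = n2_alt A
instance (A : List Int) (out : Int) : Decidable (Spec_n2 A out) := by unfold Spec_n2; infer_instance

-- ===== CLAIM (what is proved, stated in full; the proofs are below) =====
def Claim_equal_n2 : Prop := ∀ (A : List Int), Dom_n2 A → Spec_n2 A (n2 A)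

-- ===== LEMMAS AND PROOFS =====

theorem foldl_add_eq (l : List Int) (c : Int) :
    l.foldl (fun s el => s + el) c = c + l.sum := by
  induction l generalizing c with
  | nil => simp
  | cons x xs ih => simp [List.foldl_cons, ih, List.sum_cons]; ring

theorem foldl_sub_eq (l : List Int) (c : Int) :
    l.foldl (fun s el => s - el) c = c - l.sum := by
  induction l generalizing c with
  | nil => simp
  | cons x xs ih => simp [List.foldl_cons, ih, List.sum_cons]; ring

-- A's per-split candidate equals |2 * prefix − total|.
theorem cur_eq (A : List Int) (P : ℕ) :
    (A.take P).sum - (A.drop P).sum = 2 * (A.take P).sum - A.sum := by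
  have h : (A.take P).sum + (A.drop P).sum = A.sum := by
    rw [← List.sum_append, List.take_append_drop]
  omega

-- B's fold computes the same running minimum as a fold over the split positions.
theorem alt_fold (l : List Int) (total left best : Int) :
    (l.foldl (fun (p : Int × Int) el =>
        let lf := p.1 + el
        let d := |2 * lf - total|
        (lf, if d < p.2 then d else p.2)) (left, best)).2
      = (List.range' 1 l.length).foldl (fun b P =>
          if |2 * (left + (l.take P).sum) - total| < b
          then |2 * (left + (l.take P).sum) - total| else b) best := by
  induction l generalizing left best with
  | nil => simp
  | cons x xs ih =>
      simp only [List.foldl_cons, List.length_cons, List.range'_succ, List.take_succ_cons,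
        List.sum_cons]
      rw [ih]
      have hmap : List.range' 2 xs.length = (List.range' 1 xs.length).map (· + 1) := by
        rw [List.range'_eq_map_range, List.range'_eq_map_range, List.map_map]
        exact List.map_congr_left (fun a _ => by simp only [Function.comp_apply]; omega)
      rw [hmap, List.foldl_map]
      simp only [List.take_zero, List.sum_nil, add_zero]
      apply PySem.List.foldl_congr_mem
      intro acc P hP
      simp only [List.take_succ_cons, List.sum_cons, add_assoc]

-- ===== VERDICT (by name: the statement is the Claim_ definition above) =====
theorem n2_spec : Claim_equal_n2 := by
  intro A _
  unfold Spec_n2 n2 n2_alt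
  rw [PySem.List.slice_to_neg_one, foldl_add_eq, alt_fold]
  rw [PySem.List.pyRange_one]
  rw [List.foldl_map]
  simp only [zero_add]
  have hlen : ((A.length : Int) - 1).toNat = A.dropLast.length := by
    simp [List.length_dropLast]
  rw [hlen, List.range'_eq_map_range, List.foldl_map]
  apply PySem.List.foldl_congr_mem
  intro b y hy
  have hy' : y < A.dropLast.length := List.mem_range.mp hy
  have h1 : (0:Int) ≤ 1 + (y : Int) := by omega
  rw [PySem.List.slice_to A h1, PySem.List.slice_from A h1]
  have ht : ((1 : Int) + (y : Int)).toNat = 1 + y := by omega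
  rw [ht, foldl_add_eq, foldl_sub_eq]
  have htk : A.dropLast.take (1 + y) = A.take (1 + y) := by
    rw [List.dropLast_eq_take, List.take_take]
    congr 1
    simp only [List.length_dropLast] at hy'
    omega
  rw [htk, zero_add, cur_eq]
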